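-- pv_equiv track=rewrite | github.com/ntsoftware/japonais | tool/service/ojad.py | _get_html
-- ===== SOURCE A (Python) =====
-- def _get_html(chars):
--     """Get HTML fragement of the pronunciation."""
--
--     elements = []
--     accent = 0
--
--     for c, char_accent in chars:
--
--         if char_accent != accent:
--             if accent == 2:
--                 elements.append("</b>")
--             elif accent == 1:
--                 elements.append("</u>")
--
--             if char_accent == 2:
--                 elements.append("<b>")
--             elif char_accent == 1:
--                 elements.append("<u>")
--
--             accent = char_accent
--
--         elements.append(c)
--
--     if accent == 2:
--         elements.append("</b>")
--     elif accent == 1: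
--         elements.append("</u>")
--
--     return "".join(elements)
-- ===== SOURCE B (Python) =====
-- def _get_html(chars):
--     """Get HTML fragement of the pronunciation."""
--
--     TAGS = {1: ("<u>", "</u>"), 2: ("<b>", "</b>")}
--
--     def render(rest):
--         # rest is a (possibly empty) suffix of chars; emit one run at a time
--         if not rest:
--             return ""
--         accent = rest[0][1]
--         k = 0
--         while k < len(rest) and rest[k][1] == accent:
--             k += 1
--         open_tag, close_tag = TAGS.get(accent, ("", ""))
--         body = "".join(c for c, _ in rest[:k])
--         return open_tag + body + close_tag + render(rest[k:])
--
--     return render(chars)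
-- ===== Notes on version B (the rewrite author's own statement) =====
-- stated objective: simpler
-- what changed: Replaces the running accent-state machine with its transition comparisons and trailing flush by grouping the input into maximal runs of equal accent and wrapping each run with tags looked up in a table.
import Mathlib
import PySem

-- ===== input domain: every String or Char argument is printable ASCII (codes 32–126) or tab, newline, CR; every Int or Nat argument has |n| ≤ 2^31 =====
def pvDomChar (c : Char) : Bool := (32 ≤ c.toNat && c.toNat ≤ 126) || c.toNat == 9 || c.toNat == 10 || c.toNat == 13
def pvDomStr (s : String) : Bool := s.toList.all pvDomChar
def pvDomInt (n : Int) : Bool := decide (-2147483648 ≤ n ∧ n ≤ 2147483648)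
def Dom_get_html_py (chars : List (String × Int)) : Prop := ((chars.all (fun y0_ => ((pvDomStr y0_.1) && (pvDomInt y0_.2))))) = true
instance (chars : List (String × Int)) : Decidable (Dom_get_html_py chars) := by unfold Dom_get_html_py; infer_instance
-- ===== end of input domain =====

-- B replaces A's running accent-state machine (transition comparisons + trailing flush)
-- by grouping the input into maximal runs of equal accent and wrapping each run with
-- tags from a lookup table; same O(n) cost, simpler structure.


-- ===== PORT A =====
-- the loop body of A: state = (elements, accent)
def pvStepA (st : List String × Int) (p : String × Int) : List String × Int :=
  let elements := st.1
  let accent := st.2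
  let c := p.1
  let char_accent := p.2
  if char_accent ≠ accent then
    let elements := if accent = 2 then elements ++ ["</b>"]
                    else if accent = 1 then elements ++ ["</u>"] else elements
    let elements := if char_accent = 2 then elements ++ ["<b>"]
                    else if char_accent = 1 then elements ++ ["<u>"] else elements
    (elements ++ [c], char_accent)
  else
    (elements ++ [c], accent)

def get_html_py (chars : List (String × Int)) : String :=
  let st := chars.foldl pvStepA ([], 0)
  let elements := if st.2 = 2 then st.1 ++ ["</b>"]
                  else if st.2 = 1 then st.1 ++ ["</u>"] else st.1
  PySem.Str.join "" elements

-- ===== PORT B =====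
-- TAGS = {1: ("<u>", "</u>"), 2: ("<b>", "</b>")}
def pvTAGS : PySem.Dict Int (String × String) :=
  (PySem.Dict.empty.insert 1 ("<u>", "</u>")).insert 2 ("<b>", "</b>")

-- the `while` loop of render: how many leading entries share the accent
def pvRunLen (accent : Int) : List (String × Int) → Nat
  | [] => 0
  | p :: t => if p.2 == accent then pvRunLen accent t + 1 else 0

def pvRender : List (String × Int) → String
  | [] => ""
  | (c, a) :: t =>
    let rest := (c, a) :: t
    let k := pvRunLen a rest
    let tags := pvTAGS.getD a ("", "")
    tags.1 ++ PySem.Str.join "" ((rest.take k).map Prod.fst) ++ tags.2 ++ pvRender (rest.drop k)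
termination_by l => l.length
decreasing_by
  have hk : pvRunLen a ((c, a) :: t) = pvRunLen a t + 1 := by
    simp [pvRunLen]
  simp [hk]

def get_html_py_alt (chars : List (String × Int)) : String :=
  pvRender chars

-- ===== PRECONDITION & SPEC =====
def Spec_get_html_py (chars : List (String × Int)) (out : String) : Prop := out = get_html_py_alt chars
instance (chars : List (String × Int)) (out : String) : Decidable (Spec_get_html_py chars out) := by unfold Spec_get_html_py; infer_instance

-- ===== CLAIM (what is proved, stated in full; the proofs are below) =====
def Claim_equal_get_html_py : Prop := ∀ (chars : List (String × Int)), Dom_get_html_py chars → Spec_get_html_py chars (get_html_py chars)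

-- ===== LEMMAS AND PROOFS =====

def pvClose (a : Int) : String :=
  if a = 2 then "</b>" else if a = 1 then "</u>" else ""
def pvOpen (a : Int) : String :=
  if a = 2 then "<b>" else if a = 1 then "<u>" else ""

-- the characters A emits when started in accent-state `a` on input `l`, including the final flush
def pvF : Int → List (String × Int) → List Char
  | a, [] => (pvClose a).toList
  | a, (c, ca) :: rest =>
    if ca = a then c.toList ++ pvF a rest
    else (pvClose a).toList ++ (pvOpen ca).toList ++ c.toList ++ pvF ca rest

-- A's full output from accumulator `els` and state `a`, as a char list
def pvOut (els : List String) (a : Int) (l : List (String × Int)) : List Char :=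
  (PySem.Str.join ""
    (if (l.foldl pvStepA (els, a)).2 = 2 then (l.foldl pvStepA (els, a)).1 ++ ["</b>"]
     else if (l.foldl pvStepA (els, a)).2 = 1 then (l.foldl pvStepA (els, a)).1 ++ ["</u>"]
     else (l.foldl pvStepA (els, a)).1)).toList

@[simp] theorem pvJoinC (ls : List (List Char)) : PySem.Chars.join [] ls = ls.flatten := by
  induction ls with
  | nil => simp [PySem.Chars.join, List.intercalate]
  | cons a t ih =>
    cases t with
    | nil => simp [PySem.Chars.join, List.intercalate]
    | cons b u =>
      rw [PySem.Chars.join_cons_cons, ih]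
      simp

theorem pvJoin_toList (l : List String) :
    (PySem.Str.join "" l).toList = (l.map String.toList).flatten := by
  simp [pysem]

theorem pvTAGS_getD (a : Int) :
    pvTAGS.getD a ("", "") = (pvOpen a, pvClose a) := by
  simp only [pvTAGS, PySem.Dict.getD_insert, PySem.Dict.getD_empty, pvOpen, pvClose]
  split_ifs <;> rfl

@[simp] theorem pvRender_nil : pvRender [] = "" := by
  rw [pvRender]

theorem pvRunLen_take (a : Int) (l : List (String × Int)) :
    l.take (pvRunLen a l) = l.takeWhile (fun p => p.2 == a) := by
  induction l with
  | nil => simp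
  | cons p t ih =>
    by_cases h : p.2 = a
    · simp [pvRunLen, h, ih]
    · simp [pvRunLen, h]

theorem pvRunLen_drop (a : Int) (l : List (String × Int)) :
    l.drop (pvRunLen a l) = l.dropWhile (fun p => p.2 == a) := by
  induction l with
  | nil => simp
  | cons p t ih =>
    by_cases h : p.2 = a
    · simp [pvRunLen, h, ih]
    · simp [pvRunLen, h]

theorem pvRender_cons (c : String) (a : Int) (t : List (String × Int)) :
    (pvRender ((c, a) :: t)).toList =
      (pvOpen a).toList
        ++ ((((c, a) :: t).takeWhile (fun p => p.2 == a)).map (fun p => p.1.toList)).flatten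
        ++ (pvClose a).toList
        ++ (pvRender (((c, a) :: t).dropWhile (fun p => p.2 == a))).toList := by
  rw [pvRender]
  simp [pvRunLen_take, pvRunLen_drop, pvTAGS_getD, pysem, List.map_map,
    Function.comp_def, List.append_assoc]

theorem pvF_eq_render (l : List (String × Int)) (a : Int) :
    pvF a l =
      ((l.takeWhile (fun p => p.2 == a)).map (fun p => p.1.toList)).flatten
        ++ (pvClose a).toList
        ++ (pvRender (l.dropWhile (fun p => p.2 == a))).toList := by
  induction l generalizing a with
  | nil => simp [pvF]
  | cons p t ih =>
    obtain ⟨c, ca⟩ := p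
    by_cases h : ca = a
    · subst h
      simp only [pvF, ih ca]
      simp
    · have hne : (((c, ca).2 == a)) = false := by simpa using h
      simp only [pvF, if_neg h, List.takeWhile_cons, List.dropWhile_cons, hne,
        Bool.false_eq_true, if_false, List.map_nil, List.flatten_nil, List.nil_append]
      rw [pvRender_cons, ih ca]
      simp

theorem pvFold_eq (l : List (String × Int)) (els : List String) (a : Int) :
    pvOut els a l = (els.map String.toList).flatten ++ pvF a l := by
  induction l generalizing els a with
  | nil =>
    simp only [pvOut, List.foldl_nil, pvF, pvClose]
    split_ifs <;> simp only [pvJoin_toList] <;> simp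
  | cons p t ih =>
    obtain ⟨c, ca⟩ := p
    have hstep : pvOut els a ((c, ca) :: t) = pvOut (pvStepA (els, a) (c, ca)).1 (pvStepA (els, a) (c, ca)).2 t := by
      simp [pvOut]
    rw [hstep]
    by_cases h : ca = a
    · subst h
      have : pvStepA (els, ca) (c, ca) = (els ++ [c], ca) := by
        simp [pvStepA]
      rw [this]
      simp only [ih]
      simp [pvF]
    · have hstep2 : pvStepA (els, a) (c, ca) =
          (((if a = 2 then els ++ ["</b>"] else if a = 1 then els ++ ["</u>"] else els)
            |> (fun e => if ca = 2 then e ++ ["<b>"] else if ca = 1 then e ++ ["<u>"] else e))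
            ++ [c], ca) := by
        simp [pvStepA, h]
      rw [hstep2]
      simp only [ih]
      simp only [pvF, if_neg h]
      simp only [pvClose, pvOpen]
      split_ifs <;> simp

theorem pvMain (chars : List (String × Int)) :
    get_html_py chars = get_html_py_alt chars := by
  apply String.toList_injective
  have hA : (get_html_py chars).toList = pvOut [] 0 chars := by
    simp [get_html_py, pvOut]
  rw [hA, pvFold_eq]
  simp only [List.map_nil, List.flatten_nil, List.nil_append]
  rw [pvF_eq_render chars 0]
  cases chars with
  | nil => simp [get_html_py_alt, pvClose]
  | cons p t =>
    obtain ⟨c, ca⟩ := p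
    by_cases h : ca = 0
    · subst h
      rw [show get_html_py_alt ((c, (0:Int)) :: t) = pvRender ((c, (0:Int)) :: t) from rfl,
        pvRender_cons]
      simp [pvOpen, pvClose]
    · have hne : (((c, ca).2 == (0:Int))) = false := by simpa using h
      simp [get_html_py_alt, hne, pvClose]

-- ===== VERDICT (by name: the statement is the Claim_ definition above) =====
theorem get_html_py_spec : Claim_equal_get_html_py := by
  intro chars _
  exact pvMain chars
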